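-- pv_equiv track=rewrite | github.com/PyrokinesisStudio/Blender-Destructability-Editor | object_destruction/destruction_proc.py | layer
-- ===== SOURCE A (Python) =====
-- def layer(n):
--     ret = []
--     for i in range(0, 20):
--         if i == n-1:
--             ret.append(True)
--         else:
--             ret.append(False)
--     return ret
-- ===== SOURCE B (Python) =====
-- def layer(n):
--     ret = [False] * 20
--     if 0 <= n - 1 < 20:
--         ret[n - 1] = True
--     return ret
-- ===== Notes on version B (the rewrite author's own statement) =====
-- stated objective: simpler
-- what changed: Replaces the per-index compare-and-append loop with building a uniform all-False list and patching the single in-range slot with a guarded assignment.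
import Mathlib
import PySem

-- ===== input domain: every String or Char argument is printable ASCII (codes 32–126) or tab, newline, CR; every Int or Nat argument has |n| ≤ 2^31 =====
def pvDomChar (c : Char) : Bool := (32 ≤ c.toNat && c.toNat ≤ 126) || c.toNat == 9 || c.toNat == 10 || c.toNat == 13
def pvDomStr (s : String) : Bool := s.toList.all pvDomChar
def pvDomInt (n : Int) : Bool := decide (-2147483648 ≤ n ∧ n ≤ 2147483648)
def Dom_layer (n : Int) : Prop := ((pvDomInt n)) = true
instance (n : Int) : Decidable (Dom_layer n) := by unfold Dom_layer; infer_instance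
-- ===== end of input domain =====

-- B builds a uniform all-False list and patches the single in-range slot; A appends a per-index comparison. Objective: simpler.

-- ===== PORT A =====
-- for i in range(0, 20): append (i == n-1 ? True : False)
def layer (n : Int) : List Bool :=
  (PySem.List.pyRange 0 20 1).foldl
    (fun ret i => if i = n - 1 then ret ++ [true] else ret ++ [false]) []

-- ===== PORT B =====
-- ret = [False]*20; if 0 <= n-1 < 20: ret[n-1] = True
def layer_alt (n : Int) : List Bool :=
  let ret := List.replicate 20 false
  if 0 ≤ n - 1 ∧ n - 1 < 20 then ret.set (n - 1).toNat true else ret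

-- ===== PRECONDITION & SPEC =====
def Spec_layer (n : Int) (out : List Bool) : Prop := out = layer_alt n
instance (n : Int) (out : List Bool) : Decidable (Spec_layer n out) := by unfold Spec_layer; infer_instance

-- ===== CLAIM (what is proved, stated in full; the proofs are below) =====
def Claim_equal_layer : Prop := ∀ (n : Int), Dom_layer n → Spec_layer n (layer n)

-- ===== LEMMAS AND PROOFS =====

-- Out-of-range case: every comparison in A's loop is false, so A yields all-False, as does B.
theorem layer_out_of_range (n : Int) (h : n - 1 < 0 ∨ 20 ≤ n - 1) :
    layer n = layer_alt n := by
  have h0 : ¬((0:Int) = n - 1) := by omega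
  have h1 : ¬((1:Int) = n - 1) := by omega
  have h2 : ¬((2:Int) = n - 1) := by omega
  have h3 : ¬((3:Int) = n - 1) := by omega
  have h4 : ¬((4:Int) = n - 1) := by omega
  have h5 : ¬((5:Int) = n - 1) := by omega
  have h6 : ¬((6:Int) = n - 1) := by omega
  have h7 : ¬((7:Int) = n - 1) := by omega
  have h8 : ¬((8:Int) = n - 1) := by omega
  have h9 : ¬((9:Int) = n - 1) := by omega
  have h10 : ¬((10:Int) = n - 1) := by omega
  have h11 : ¬((11:Int) = n - 1) := by omega
  have h12 : ¬((12:Int) = n - 1) := by omega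
  have h13 : ¬((13:Int) = n - 1) := by omega
  have h14 : ¬((14:Int) = n - 1) := by omega
  have h15 : ¬((15:Int) = n - 1) := by omega
  have h16 : ¬((16:Int) = n - 1) := by omega
  have h17 : ¬((17:Int) = n - 1) := by omega
  have h18 : ¬((18:Int) = n - 1) := by omega
  have h19 : ¬((19:Int) = n - 1) := by omega
  have hg : ¬(0 ≤ n - 1 ∧ n - 1 < 20) := by omega
  have hb : layer_alt n = List.replicate 20 false := by
    simp only [layer_alt]
    rw [if_neg hg]
  rw [hb]
  simp [layer, PySem.List.pyRange, List.range_succ, h0, h1, h2, h3, h4, h5, h6, h7, h8,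
    h9, h10, h11, h12, h13, h14, h15, h16, h17, h18, h19, List.replicate]

-- ===== VERDICT (by name: the statement is the Claim_ definition above) =====
theorem layer_spec : Claim_equal_layer := by
  intro n _
  unfold Spec_layer
  by_cases h : 0 ≤ n - 1 ∧ n - 1 < 20
  · obtain ⟨hl, hr⟩ := h
    have hl' : (1:Int) ≤ n := by omega
    have hr' : n ≤ 20 := by omega
    interval_cases n <;> decide
  · exact layer_out_of_range n (by omega)
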